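-- pv_equiv track=rewrite | github.com/tyfei216/hash | utils_tf.py | make_train_dict
-- ===== SOURCE A (Python) =====
-- def push_query(query, url, dict):
--     if query in dict:
--         dict[query].append(url)
--     else:
--         dict[query] = [url]
--     return dict
--
-- def make_train_dict(query_list, url_list, label_dim):
--     query_url = {}
--     query_pos = {}
--     query_neg = {}
--     query_num = len(query_list) - 1
--     url_num = len(url_list) - 1
--
--     for i in range(query_num):
--         query = query_list[i]
--         for j in range(url_num):
--             url = url_list[j]
--             if i == j:
--                 push_query(query, url, query_url)
--                 push_query(query, url, query_pos)
--             else: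
--                 push_query(query, url, query_url)
--                 push_query(query, url, query_neg)
--
--     return query_url, query_pos, query_neg
-- ===== SOURCE B (Python) =====
-- def make_train_dict(query_list, url_list, label_dim):
--     query_url = {}
--     query_pos = {}
--     query_neg = {}
--     url_num = len(url_list) - 1
--     urls = url_list[:url_num]
--     for i in range(len(query_list) - 1):
--         query = query_list[i]
--         if urls:
--             query_url.setdefault(query, []).extend(urls)
--         if i < url_num:
--             query_pos.setdefault(query, []).append(url_list[i])
--         negs = urls[:i] + urls[i + 1:]
--         if negs:
--             query_neg.setdefault(query, []).extend(negs)
--     return query_url, query_pos, query_neg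
-- ===== Notes on version B (the rewrite author's own statement) =====
-- stated objective: simpler
-- what changed: B removes A's inner loop over url indices and the i == j comparison: per query it extends query_url with the whole url prefix at once via setdefault, picks the positive url by index in closed form, and builds the negatives as the url prefix with index i removed.
import Mathlib
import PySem

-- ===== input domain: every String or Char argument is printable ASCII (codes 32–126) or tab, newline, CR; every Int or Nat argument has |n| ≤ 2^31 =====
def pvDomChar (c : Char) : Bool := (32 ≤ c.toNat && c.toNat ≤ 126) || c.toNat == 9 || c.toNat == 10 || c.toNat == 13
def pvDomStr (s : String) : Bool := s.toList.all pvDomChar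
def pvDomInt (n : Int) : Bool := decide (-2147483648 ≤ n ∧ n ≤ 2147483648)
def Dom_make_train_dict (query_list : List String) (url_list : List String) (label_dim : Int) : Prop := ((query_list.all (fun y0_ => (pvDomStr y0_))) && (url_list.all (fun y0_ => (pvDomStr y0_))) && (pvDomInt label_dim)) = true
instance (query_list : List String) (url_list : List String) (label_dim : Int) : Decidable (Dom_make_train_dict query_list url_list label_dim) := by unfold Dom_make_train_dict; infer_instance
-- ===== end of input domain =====

-- B drops A's inner loop over all (i, j) pairs with its i == j test: per query it extends
-- query_url with the whole url prefix at once, takes the positive url by index in closed form,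
-- and builds the negatives as "all urls but index i" (objective: simpler decomposition).

-- ===== PORT A =====
def push_query (query : String) (url : String) (d : PySem.Dict String (List String)) :
    PySem.Dict String (List String) :=
  if d.contains query then d.modify query [] (fun v => v ++ [url])
  else d.insert query [url]

def make_train_dict (query_list : List String) (url_list : List String) (label_dim : Int) :
    (List (String × List String)) × (List (String × List String)) × (List (String × List String)) :=
  let query_num : Int := PySem.List.len query_list - 1
  let url_num : Int := PySem.List.len url_list - 1
  let st :=
    (PySem.List.pyRange 0 query_num 1).foldl
      (fun st i =>
        let query := PySem.List.pyGetD query_list i ""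
        (PySem.List.pyRange 0 url_num 1).foldl
          (fun st j =>
            let url := PySem.List.pyGetD url_list j ""
            if i == j then
              (push_query query url st.1, push_query query url st.2.1, st.2.2)
            else
              (push_query query url st.1, st.2.1, push_query query url st.2.2))
          st)
      (PySem.Dict.empty, PySem.Dict.empty, PySem.Dict.empty)
  (st.1.items, st.2.1.items, st.2.2.items)

-- ===== PORT B =====
-- d.setdefault(query, []).extend(urls)
def extend_query (query : String) (urls : List String) (d : PySem.Dict String (List String)) :
    PySem.Dict String (List String) :=
  (d.setdefault query []).modify query [] (fun v => v ++ urls)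

-- d.setdefault(query, []).append(url)
def append_query (query : String) (url : String) (d : PySem.Dict String (List String)) :
    PySem.Dict String (List String) :=
  (d.setdefault query []).modify query [] (fun v => v ++ [url])

def make_train_dict_alt (query_list : List String) (url_list : List String) (label_dim : Int) :
    (List (String × List String)) × (List (String × List String)) × (List (String × List String)) :=
  let url_num : Int := PySem.List.len url_list - 1
  let urls := PySem.List.slice url_list none (some url_num)
  let st :=
    (PySem.List.pyRange 0 (PySem.List.len query_list - 1) 1).foldl
      (fun st i =>
        let query := PySem.List.pyGetD query_list i ""
        let qu := if urls.isEmpty then st.1 else extend_query query urls st.1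
        let qp := if i < url_num then append_query query (PySem.List.pyGetD url_list i "") st.2.1
                  else st.2.1
        let negs := PySem.List.slice urls none (some i) ++ PySem.List.slice urls (some (i + 1)) none
        let qn := if negs.isEmpty then st.2.2 else extend_query query negs st.2.2
        (qu, qp, qn))
      (PySem.Dict.empty, PySem.Dict.empty, PySem.Dict.empty)
  (st.1.items, st.2.1.items, st.2.2.items)

-- ===== PRECONDITION & SPEC =====
def Spec_make_train_dict (query_list : List String) (url_list : List String) (label_dim : Int) (out : (List (String × List String)) × (List (String × List String)) × (List (String × List String))) : Prop := out = make_train_dict_alt query_list url_list label_dim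
instance (query_list : List String) (url_list : List String) (label_dim : Int) (out : (List (String × List String)) × (List (String × List String)) × (List (String × List String))) : Decidable (Spec_make_train_dict query_list url_list label_dim out) := by unfold Spec_make_train_dict; infer_instance

-- ===== CLAIM (what is proved, stated in full; the proofs are below) =====
def Claim_equal_make_train_dict : Prop := ∀ (query_list : List String) (url_list : List String) (label_dim : Int), Dom_make_train_dict query_list url_list label_dim → Spec_make_train_dict query_list url_list label_dim (make_train_dict query_list url_list label_dim)

-- ===== LEMMAS AND PROOFS =====

-- canonical form of one "touch key q, append vs" update
def accQ (q : String) (vs : List String) (d : PySem.Dict String (List String)) :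
    PySem.Dict String (List String) :=
  (d.setdefault q []).insert q (d.getD q [] ++ vs)

lemma push_eq_accQ (q u : String) (d : PySem.Dict String (List String)) :
    push_query q u d = accQ q [u] d := by
  by_cases h : d.contains q
  · simp [push_query, accQ, h, PySem.Dict.modify, PySem.Dict.setdefault_of_contains _ _ h]
  · have h' : d.contains q = false := by simpa using h
    simp only [push_query, accQ, h, Bool.false_eq_true, if_false,
      PySem.Dict.setdefault_of_not_contains _ _ h',
      PySem.Dict.getD_of_not_contains _ _ h',
      PySem.Dict.insert_insert_self, List.nil_append]

lemma extend_eq_accQ (q : String) (us : List String) (d : PySem.Dict String (List String)) :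
    extend_query q us d = accQ q us d := by
  simp [extend_query, accQ, PySem.Dict.modify, PySem.Dict.getD_setdefault_self]

lemma append_eq_accQ (q u : String) (d : PySem.Dict String (List String)) :
    append_query q u d = accQ q [u] d := by
  simp [append_query, accQ, PySem.Dict.modify, PySem.Dict.getD_setdefault_self]

lemma accQ_accQ (q : String) (vs ws : List String) (d : PySem.Dict String (List String)) :
    accQ q ws (accQ q vs d) = accQ q (vs ++ ws) d := by
  simp only [accQ]
  rw [PySem.Dict.setdefault_of_contains _ _ (PySem.Dict.contains_insert_self _ _ _),
    PySem.Dict.getD_insert_self, PySem.Dict.insert_insert_self, List.append_assoc]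

lemma foldl_push (q : String) (us : List String) (d : PySem.Dict String (List String)) :
    us.foldl (fun d u => push_query q u d) d = if us.isEmpty then d else accQ q us d := by
  induction us generalizing d with
  | nil => simp
  | cons u us ih =>
    rw [List.foldl_cons, ih]
    cases us with
    | nil => simp [push_eq_accQ]
    | cons v vs => simp [push_eq_accQ, accQ_accQ]

lemma foldl_id {α β : Type} (l : List α) (d : β) : l.foldl (fun d _ => d) d = d := by
  induction l generalizing d with
  | nil => rfl
  | cons x xs ih => exact ih d

lemma foldl_skip {β : Type} (G : β → Int → β) (i a b : Int) (h : i < a ∨ b ≤ i) (d : β) :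
    (PySem.List.pyRange a b 1).foldl (fun d j => if i == j then G d j else d) d = d := by
  rw [PySem.List.foldl_congr_mem _ _ (fun d _ => d) d ?_, foldl_id]
  intro acc x hx
  have hx' := (PySem.List.mem_pyRange_one).1 hx
  have : ¬ (i = x) := by omega
  simp [this]

lemma foldl_fire {β : Type} (G : β → Int → β) (i a b : Int) (h1 : a ≤ i) (h2 : i < b) (d : β) :
    (PySem.List.pyRange a b 1).foldl (fun d j => if i == j then G d j else d) d = G d i := by
  rw [PySem.List.pyRange_one_append a i b h1 (le_of_lt h2), List.foldl_append,
    foldl_skip G i a i (Or.inr le_rfl) d,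
    PySem.List.pyRange_one_cons h2, List.foldl_cons]
  simp only [BEq.rfl, if_true]
  exact foldl_skip G i (i + 1) b (Or.inl (by omega)) (G d i)

-- a push-loop over indices [a, a+n) of ul is a push-loop over the corresponding sublist
lemma foldl_push_range (ul : List String) (q : String) (n a : Nat) (d : PySem.Dict String (List String))
    (h : a + n ≤ ul.length) :
    (PySem.List.pyRange (a : Int) ((a : Int) + (n : Int)) 1).foldl
        (fun d j => push_query q (PySem.List.pyGetD ul j "") d) d
      = ((ul.drop a).take n).foldl (fun d u => push_query q u d) d := by
  induction n generalizing a d with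
  | zero => simp [PySem.List.pyRange_one_eq_nil]
  | succ n ih =>
    have ha : a < ul.length := by omega
    rw [PySem.List.pyRange_one_cons
        (show (a : Int) < (a : Int) + (((n : Nat) + 1 : Nat) : Int) by push_cast; omega),
      List.foldl_cons, List.drop_eq_getElem_cons ha, List.take_succ_cons, List.foldl_cons]
    have hcast : (a : Int) + (((n : Nat) + 1 : Nat) : Int) = ((a + 1 : Nat) : Int) + (n : Int) := by
      push_cast; ring
    have hcast2 : (a : Int) + 1 = ((a + 1 : Nat) : Int) := by push_cast; ring
    have hget : PySem.List.pyGetD ul (a : Int) "" = ul[a] := by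
      rw [PySem.List.pyGetD_natCast, List.getD_eq_getElem ul "" ha]
    rw [hget, hcast, hcast2]
    exact ih (a + 1) _ (by omega)

lemma foldl_push_range_zero (ul : List String) (q : String) (b : Int)
    (d : PySem.Dict String (List String)) (hb : 0 ≤ b) (hlen : b ≤ (ul.length : Int)) :
    (PySem.List.pyRange 0 b 1).foldl (fun d j => push_query q (PySem.List.pyGetD ul j "") d) d
      = (ul.take b.toNat).foldl (fun d u => push_query q u d) d := by
  have := foldl_push_range ul q b.toNat 0 d (by omega)
  simpa [show ((0 : Nat) : Int) = 0 by rfl, show ((b.toNat : Nat) : Int) = b by omega] using this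

-- component lemma: the query_url column of A's inner loop
lemma quL (ul : List String) (q : String) (d : PySem.Dict String (List String)) :
    (PySem.List.pyRange 0 ((ul.length : Int) - 1) 1).foldl
        (fun d j => push_query q (PySem.List.pyGetD ul j "") d) d
      = (if (PySem.List.slice ul none (some ((ul.length : Int) - 1))).isEmpty then d
         else extend_query q (PySem.List.slice ul none (some ((ul.length : Int) - 1))) d) := by
  by_cases hn : (0 : Int) ≤ (ul.length : Int) - 1
  · rw [foldl_push_range_zero ul q _ d hn (by omega), foldl_push,
      PySem.List.slice_to ul hn, extend_eq_accQ]
  · have hul : ul = [] := List.eq_nil_iff_length_eq_zero.mpr (by omega)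
    subst hul
    rw [PySem.List.pyRange_one_eq_nil (by norm_num)]
    simp [PySem.List.slice]

-- component lemma: the query_pos column of A's inner loop
lemma qpL (ul : List String) (q : String) (i : Int) (hi : 0 ≤ i)
    (d : PySem.Dict String (List String)) :
    (PySem.List.pyRange 0 ((ul.length : Int) - 1) 1).foldl
        (fun d j => if i == j then push_query q (PySem.List.pyGetD ul j "") d else d) d
      = (if i < (ul.length : Int) - 1 then append_query q (PySem.List.pyGetD ul i "") d else d) := by
  by_cases hlt : i < (ul.length : Int) - 1
  · rw [foldl_fire _ i 0 _ hi hlt d, if_pos hlt, append_eq_accQ, push_eq_accQ]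
  · rw [foldl_skip _ i 0 _ (Or.inr (by omega)) d, if_neg hlt]

-- component lemma: the query_neg column of A's inner loop
lemma qnL (ul : List String) (q : String) (i : Int) (hi : 0 ≤ i)
    (d : PySem.Dict String (List String)) :
    (PySem.List.pyRange 0 ((ul.length : Int) - 1) 1).foldl
        (fun d j => if i == j then d else push_query q (PySem.List.pyGetD ul j "") d) d
      = (if ((PySem.List.slice (PySem.List.slice ul none (some ((ul.length : Int) - 1))) none (some i)
              ++ PySem.List.slice (PySem.List.slice ul none (some ((ul.length : Int) - 1))) (some (i + 1)) none)).isEmpty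
         then d
         else extend_query q
           (PySem.List.slice (PySem.List.slice ul none (some ((ul.length : Int) - 1))) none (some i)
             ++ PySem.List.slice (PySem.List.slice ul none (some ((ul.length : Int) - 1))) (some (i + 1)) none) d) := by
  by_cases hn : (0 : Int) ≤ (ul.length : Int) - 1
  · set un : Int := (ul.length : Int) - 1 with hun
    have hurls : PySem.List.slice ul none (some un) = ul.take un.toNat :=
      PySem.List.slice_to ul hn
    rw [hurls, PySem.List.slice_to _ hi, PySem.List.slice_from _ (by omega)]
    have htake : (ul.take un.toNat).take i.toNat = ul.take (min i.toNat un.toNat) :=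
      List.take_take
    by_cases hlt : i < un
    · -- split the index range at i and i+1
      rw [PySem.List.pyRange_one_append 0 i un hi (by omega), List.foldl_append,
        PySem.List.pyRange_one_cons (show i < un from hlt), List.foldl_cons]
      rw [PySem.List.foldl_congr_mem (PySem.List.pyRange 0 i 1) _
        (fun d j => push_query q (PySem.List.pyGetD ul j "") d) d
        (by intro acc x hx; have := (PySem.List.mem_pyRange_one).1 hx
            have : ¬ (i = x) := by omega
            simp [this])]
      simp only [BEq.rfl, if_true]
      rw [PySem.List.foldl_congr_mem (PySem.List.pyRange (i + 1) un 1) _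
        (fun d j => push_query q (PySem.List.pyGetD ul j "") d) _
        (by intro acc x hx; have := (PySem.List.mem_pyRange_one).1 hx
            have : ¬ (i = x) := by omega
            simp [this])]
      have e1 := foldl_push_range_zero ul q i d hi (by omega)
      have e2 := foldl_push_range ul q (un - (i + 1)).toNat (i + 1).toNat
        ((PySem.List.pyRange 0 i 1).foldl (fun d j => push_query q (PySem.List.pyGetD ul j "") d) d)
        (by omega)
      rw [show ((i + 1).toNat : Int) = i + 1 by omega, show (((un - (i + 1)).toNat : Nat) : Int) = un - (i + 1) by omega,
        show i + 1 + (un - (i + 1)) = un by ring] at e2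
      rw [e1] at e2
      rw [e1, e2, ← List.foldl_append, foldl_push]
      have hdrop : (ul.take un.toNat).drop (i + 1).toNat
          = (ul.drop (i + 1).toNat).take ((un - (i + 1)).toNat) := by
        rw [List.drop_take]; congr 1; omega
      rw [htake, show min i.toNat un.toNat = i.toNat by omega, hdrop]
      simp only [extend_eq_accQ]
    · -- i is past the whole url range: every j pushes, and negs is all of urls
      rw [PySem.List.foldl_congr_mem _ _
        (fun d j => push_query q (PySem.List.pyGetD ul j "") d) d
        (by intro acc x hx; have := (PySem.List.mem_pyRange_one).1 hx
            have : ¬ (i = x) := by omega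
            simp [this])]
      rw [foldl_push_range_zero ul q un d hn (by omega), foldl_push]
      have hlen : (ul.take un.toNat).length = un.toNat := by
        rw [List.length_take]; omega
      have h1 : (ul.take un.toNat).take i.toNat = ul.take un.toNat :=
        List.take_of_length_le (by omega)
      have h2 : (ul.take un.toNat).drop (i + 1).toNat = [] :=
        List.drop_eq_nil_of_le (by omega)
      rw [h1, h2, List.append_nil]
      simp only [extend_eq_accQ]
  · have hul : ul = [] := List.eq_nil_iff_length_eq_zero.mpr (by omega)
    subst hul
    rw [PySem.List.pyRange_one_eq_nil (by norm_num)]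
    simp [PySem.List.slice]

lemma foldl_prod3 {β σ₁ σ₂ σ₃ : Type} (f : σ₁ → β → σ₁) (g : σ₂ → β → σ₂) (h : σ₃ → β → σ₃)
    (l : List β) (a : σ₁) (b : σ₂) (c : σ₃) :
    l.foldl (fun s e => (f s.1 e, g s.2.1 e, h s.2.2 e)) (a, b, c) =
      (l.foldl f a, l.foldl g b, l.foldl h c) := by
  induction l generalizing a b c with
  | nil => rfl
  | cons x xs ih => simpa using ih (f a x) (g b x) (h c x)

lemma main_step (ql ul : List String)
    (st : PySem.Dict String (List String) × PySem.Dict String (List String) × PySem.Dict String (List String))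
    (i : Int) (hi : i ∈ PySem.List.pyRange 0 ((ql.length : Int) - 1) 1) :
    (PySem.List.pyRange 0 ((ul.length : Int) - 1) 1).foldl
      (fun st j =>
        if i == j then
          (push_query (PySem.List.pyGetD ql i "") (PySem.List.pyGetD ul j "") st.1,
           push_query (PySem.List.pyGetD ql i "") (PySem.List.pyGetD ul j "") st.2.1, st.2.2)
        else
          (push_query (PySem.List.pyGetD ql i "") (PySem.List.pyGetD ul j "") st.1,
           st.2.1, push_query (PySem.List.pyGetD ql i "") (PySem.List.pyGetD ul j "") st.2.2)) st
    = (if (PySem.List.slice ul none (some ((ul.length : Int) - 1))).isEmpty then st.1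
       else extend_query (PySem.List.pyGetD ql i "") (PySem.List.slice ul none (some ((ul.length : Int) - 1))) st.1,
       if i < (ul.length : Int) - 1 then
         append_query (PySem.List.pyGetD ql i "") (PySem.List.pyGetD ul i "") st.2.1
       else st.2.1,
       if ((PySem.List.slice (PySem.List.slice ul none (some ((ul.length : Int) - 1))) none (some i)
             ++ PySem.List.slice (PySem.List.slice ul none (some ((ul.length : Int) - 1))) (some (i + 1)) none)).isEmpty
       then st.2.2
       else extend_query (PySem.List.pyGetD ql i "")
         (PySem.List.slice (PySem.List.slice ul none (some ((ul.length : Int) - 1))) none (some i)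
           ++ PySem.List.slice (PySem.List.slice ul none (some ((ul.length : Int) - 1))) (some (i + 1)) none) st.2.2) := by
  obtain ⟨d1, d2, d3⟩ := st
  have hi0 : (0 : Int) ≤ i := ((PySem.List.mem_pyRange_one).1 hi).1
  -- split A's inner step into three independent columns
  have hsplit :
      (fun (st : PySem.Dict String (List String) × PySem.Dict String (List String) × PySem.Dict String (List String)) j =>
        if i == j then
          (push_query (PySem.List.pyGetD ql i "") (PySem.List.pyGetD ul j "") st.1,
           push_query (PySem.List.pyGetD ql i "") (PySem.List.pyGetD ul j "") st.2.1, st.2.2)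
        else
          (push_query (PySem.List.pyGetD ql i "") (PySem.List.pyGetD ul j "") st.1,
           st.2.1, push_query (PySem.List.pyGetD ql i "") (PySem.List.pyGetD ul j "") st.2.2))
      = (fun st j =>
          ((fun d j => push_query (PySem.List.pyGetD ql i "") (PySem.List.pyGetD ul j "") d) st.1 j,
           (fun d j => if i == j then push_query (PySem.List.pyGetD ql i "") (PySem.List.pyGetD ul j "") d else d) st.2.1 j,
           (fun d j => if i == j then d else push_query (PySem.List.pyGetD ql i "") (PySem.List.pyGetD ul j "") d) st.2.2 j)) := by
    funext st j
    by_cases h : i = j <;> simp [h]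
  rw [hsplit]
  rw [foldl_prod3 (fun d j => push_query (PySem.List.pyGetD ql i "") (PySem.List.pyGetD ul j "") d)
    (fun d j => if i == j then push_query (PySem.List.pyGetD ql i "") (PySem.List.pyGetD ul j "") d else d)
    (fun d j => if i == j then d else push_query (PySem.List.pyGetD ql i "") (PySem.List.pyGetD ul j "") d)
    (PySem.List.pyRange 0 ((ul.length : Int) - 1) 1) d1 d2 d3]
  rw [quL ul _ d1, qpL ul _ i hi0 d2, qnL ul _ i hi0 d3]

-- ===== VERDICT (by name: the statement is the Claim_ definition above) =====
theorem make_train_dict_spec : Claim_equal_make_train_dict := by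
  intro ql ul ld _
  unfold Spec_make_train_dict make_train_dict make_train_dict_alt
  simp only [PySem.List.len_eq]
  have h := PySem.List.foldl_congr_mem (PySem.List.pyRange 0 ((ql.length : Int) - 1) 1) _ _
    ((PySem.Dict.empty : PySem.Dict String (List String)), (PySem.Dict.empty : PySem.Dict String (List String)), (PySem.Dict.empty : PySem.Dict String (List String)))
    (fun st i hi => main_step ql ul st i hi)
  rw [h]
  rfl
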